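-- pv_equiv track=rewrite | github.com/billiyagi/myPython | DDP Tugas 10/konsonan.py | konsonan
-- ===== SOURCE A (Python) =====
-- def konsonan(param):
--     konsonans = ["b", "c", "d", "f", "g", "h", "j", "k", "l", "m",
--                  "n", "p", "q", "r", "s", "t", "v", "w", "x", "y", "z"]
--
--     # Pecah parameter kata menjadi sebuah list
--     i = 0
--     paramArray = []
--     paramUpper = []
--     while i < len(param):
--         if param[i].isupper():
--             paramUpper.append(param[i])
--         paramArray.append(param[i])
--         i += 1
--
--     # Filter list kata pada parameter dengan huruf konsonan
--     paramFilter = []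
--     for karakterParam in paramArray:
--         karakterParam = karakterParam.lower()
--         if karakterParam in konsonans:
--             paramFilter.append(karakterParam)
--
--     # Gantikan Huruf asli, jika sebelumnya kapital akan menjadi kapital kembali
--     for karakterNum in range(len(paramFilter)):
--         if paramFilter[karakterNum].upper() in paramUpper:
--             paramFilter[karakterNum] = paramFilter[karakterNum].upper()
--
--     # Jadikan string, array dari hasil filter akan disatukan menjadi sebuah kata/teks
--     results = ''.join(paramFilter)
--
--     return results
-- ===== SOURCE B (Python) =====
-- def konsonan(param):
--     # Build a translation table once over the fixed consonant alphabet: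
--     # each consonant letter (both cases) maps to its output form -- uppercase
--     # if that uppercase letter occurs anywhere in param, else lowercase.
--     mapping = {}
--     for c in "bcdfghjklmnpqrstvwxyz":
--         u = c.upper()
--         out = u if u in param else c
--         mapping[c] = out
--         mapping[u] = out
--     # One lookup per character; non-consonants are absent and yield ''.
--     return ''.join(mapping.get(ch, '') for ch in param)
-- ===== Notes on version B (the rewrite author's own statement) =====
-- stated objective: alternative
-- what changed: Replaced A's three passes over the input (index while-loop collecting chars and uppercase letters, a consonant-filter pass building an intermediate list, and a second index loop re-uppercasing it) by a translation table built once over the fixed 21-letter consonant alphabet (each letter's output form decided up front by a substring test), after which the result is a single table lookup per character.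
import Mathlib
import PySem

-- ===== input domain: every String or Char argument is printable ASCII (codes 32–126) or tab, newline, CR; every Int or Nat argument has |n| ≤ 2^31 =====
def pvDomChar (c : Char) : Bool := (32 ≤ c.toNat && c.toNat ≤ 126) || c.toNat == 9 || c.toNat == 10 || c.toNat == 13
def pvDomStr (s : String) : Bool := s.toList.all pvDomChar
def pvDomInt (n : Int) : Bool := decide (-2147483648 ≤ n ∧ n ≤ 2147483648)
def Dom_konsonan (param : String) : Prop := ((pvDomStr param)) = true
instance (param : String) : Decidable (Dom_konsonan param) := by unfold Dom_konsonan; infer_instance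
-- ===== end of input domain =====

-- B replaces A's three passes over the input (split + collect uppercase, consonant
-- filter, index-based re-uppercasing) by a 42-entry translation table built once over
-- the fixed consonant alphabet, then a single lookup per character; objective: alternative.

-- ===== PORT A =====
def konsonanCons : List Char :=
  ['b','c','d','f','g','h','j','k','l','m','n','p','q','r','s','t','v','w','x','y','z']

def konsonan (param : String) : String :=
  -- while loop over indices, collecting paramUpper (.1) and paramArray (.2)
  let p := param.toList.foldl
    (fun (st : List Char × List Char) c =>
      (if PySem.Chars.isupper c then st.1 ++ [c] else st.1, st.2 ++ [c])) ([], [])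
  -- filter pass (chars lowered, kept if consonant)
  let paramFilter := p.2.foldl
    (fun acc c =>
      let c := PySem.Chars.lowerChar c
      if konsonanCons.contains c then acc ++ [c] else acc) []
  -- in-place re-uppercasing pass over paramFilter (index loop ported as map)
  let results := paramFilter.map
    (fun c => if p.1.contains (PySem.Chars.upperChar c) then PySem.Chars.upperChar c else c)
  String.ofList results

-- ===== PORT B =====
-- the characters of the string literal "bcdfghjklmnpqrstvwxyz"
def konsonanAlphabet : List Char :=
  ['b','c','d','f','g','h','j','k','l','m','n','p','q','r','s','t','v','w','x','y','z']

def konsonan_alt (param : String) : String :=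
  -- build the translation table: both cases of each consonant map to its output form
  let mapping := konsonanAlphabet.foldl
    (fun (t : PySem.Dict Char String) c =>
      (t.insert c
          (if PySem.Str.isIn (String.ofList [PySem.Chars.upperChar c]) param
           then String.ofList [PySem.Chars.upperChar c] else String.ofList [c])).insert
        (PySem.Chars.upperChar c)
        (if PySem.Str.isIn (String.ofList [PySem.Chars.upperChar c]) param
         then String.ofList [PySem.Chars.upperChar c] else String.ofList [c]))
    PySem.Dict.empty
  -- ''.join(mapping.get(ch, '') for ch in param)
  PySem.Str.join "" (param.toList.map (fun ch => mapping.getD ch ""))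

-- ===== PRECONDITION & SPEC =====
def Spec_konsonan (param : String) (out : String) : Prop := out = konsonan_alt param
instance (param : String) (out : String) : Decidable (Spec_konsonan param out) := by unfold Spec_konsonan; infer_instance

-- ===== CLAIM (what is proved, stated in full; the proofs are below) =====
def Claim_equal_konsonan : Prop := ∀ (param : String), Dom_konsonan param → Spec_konsonan param (konsonan param)

-- ===== LEMMAS AND PROOFS =====

-- A's while loop: pair-fold result in closed form
theorem foldPair_eq (q : Char → Bool) :
    ∀ (cs : List Char) (a b : List Char),
      cs.foldl (fun (st : List Char × List Char) c =>
        (if q c then st.1 ++ [c] else st.1, st.2 ++ [c])) (a, b)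
      = (a ++ cs.filter q, b ++ cs) := by
  intro cs
  induction cs with
  | nil => intro a b; simp
  | cons c cs ih =>
    intro a b
    simp only [List.foldl_cons, List.filter_cons]
    by_cases h : q c = true <;> simp [h, ih]

-- A's filter loop in closed form
theorem foldFilter_eq (p : Char → Bool) (l : Char → Char) :
    ∀ (cs : List Char) (acc : List Char),
      cs.foldl (fun acc c => if p (l c) then acc ++ [l c] else acc) acc
      = acc ++ (cs.map l).filter p := by
  intro cs
  induction cs with
  | nil => intro acc; simp
  | cons c cs ih =>
    intro acc
    simp only [List.foldl_cons, List.map_cons, List.filter_cons]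
    by_cases h : p (l c) = true <;> simp [h, ih]

-- B's table-building fold: lookup of a key that is none of the inserted keys
theorem getD_build_skip (f : Char → String) :
    ∀ (cs : List Char) (d : PySem.Dict Char String) (ch : Char),
      ch ∉ cs → ch ∉ cs.map PySem.Chars.upperChar →
      (cs.foldl (fun t c => (t.insert c (f c)).insert (PySem.Chars.upperChar c) (f c)) d).getD ch ""
        = d.getD ch "" := by
  intro cs
  induction cs with
  | nil => intro d ch _ _; rfl
  | cons c cs ih =>
    intro d ch h1 h2
    simp only [List.mem_cons, not_or, List.map_cons] at h1 h2
    simp only [List.foldl_cons]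
    rw [ih _ _ h1.2 h2.2, PySem.Dict.getD_insert, if_neg h2.1, PySem.Dict.getD_insert,
      if_neg h1.1]

-- lookup of a lowercase key of the table
theorem getD_build_lower (f : Char → String) :
    ∀ (cs : List Char) (d : PySem.Dict Char String) (ch : Char),
      ch ∈ cs → cs.Nodup → ch ∉ cs.map PySem.Chars.upperChar →
      (cs.foldl (fun t c => (t.insert c (f c)).insert (PySem.Chars.upperChar c) (f c)) d).getD ch ""
        = f ch := by
  intro cs
  induction cs with
  | nil => intro d ch h; cases h
  | cons c cs ih =>
    intro d ch h1 hnd h2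
    simp only [List.map_cons, List.mem_cons, not_or] at h2
    simp only [List.foldl_cons]
    rcases List.mem_cons.mp h1 with rfl | hmem
    · rw [getD_build_skip f cs _ ch ((List.nodup_cons.mp hnd).1) h2.2,
        PySem.Dict.getD_insert, if_neg h2.1, PySem.Dict.getD_insert, if_pos rfl]
    · exact ih _ _ hmem (List.nodup_cons.mp hnd).2 h2.2

-- lookup of an uppercase key of the table
theorem getD_build_upper (f : Char → String) :
    ∀ (cs : List Char) (d : PySem.Dict Char String) (c0 : Char),
      c0 ∈ cs → (cs.map PySem.Chars.upperChar).Nodup →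
      (∀ x ∈ cs, PySem.Chars.upperChar x ∉ cs) →
      (cs.foldl (fun t c => (t.insert c (f c)).insert (PySem.Chars.upperChar c) (f c)) d).getD
          (PySem.Chars.upperChar c0) "" = f c0 := by
  intro cs
  induction cs with
  | nil => intro d c0 h; cases h
  | cons c cs ih =>
    intro d c0 h1 hnd hdisj
    simp only [List.map_cons, List.nodup_cons] at hnd
    simp only [List.foldl_cons]
    rcases List.mem_cons.mp h1 with rfl | hmem
    · have hnotin : PySem.Chars.upperChar c0 ∉ cs := by
        intro hx
        exact hdisj c0 (List.mem_cons_self) (List.mem_cons_of_mem _ hx)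
      rw [getD_build_skip f cs _ _ hnotin hnd.1, PySem.Dict.getD_insert, if_pos rfl]
    · exact ih _ _ hmem hnd.2 (fun x hx hc =>
        hdisj x (List.mem_cons_of_mem _ hx) (List.mem_cons_of_mem _ hc))

-- uppercase chars round-trip: upperChar (lowerChar ch) = ch
theorem upper_lower_roundtrip (ch : Char) (h : PySem.Chars.isupper ch = true) :
    PySem.Chars.upperChar (PySem.Chars.lowerChar ch) = ch := by
  have hb : 65 ≤ ch.toNat ∧ ch.toNat ≤ 90 := by
    simp [PySem.Chars.isupper] at h; exact ⟨h.1, h.2⟩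
  have hlow : PySem.Chars.lowerChar ch = Char.ofNat (ch.toNat + 32) := by
    simp [PySem.Chars.lowerChar, h]
  have ht : (Char.ofNat (ch.toNat + 32)).toNat = ch.toNat + 32 := by
    rw [Char.toNat_ofNat, if_pos (Or.inl (by omega))]
  have h1 : 'a' ≤ Char.ofNat (ch.toNat + 32) := by
    rw [Char.le_def, UInt32.le_iff_toNat_le]
    show (97 : Nat) ≤ (Char.ofNat (ch.toNat + 32)).toNat
    rw [ht]; omega
  have h2 : Char.ofNat (ch.toNat + 32) ≤ 'z' := by
    rw [Char.le_def, UInt32.le_iff_toNat_le]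
    show (Char.ofNat (ch.toNat + 32)).toNat ≤ 122
    rw [ht]; omega
  have hlower : PySem.Chars.islower (Char.ofNat (ch.toNat + 32)) = true := by
    simp [PySem.Chars.islower, h1, h2]
  rw [hlow]
  simp only [PySem.Chars.upperChar, hlower, if_pos, ht]
  have h32 : ch.toNat + 32 - 32 = ch.toNat := by omega
  rw [h32, Char.ofNat_toNat]

-- elementwise facts about the consonant alphabet
theorem alpha_lower_upper :
    ∀ c ∈ konsonanAlphabet,
      PySem.Chars.lowerChar (PySem.Chars.upperChar c) = c := by
  intro c hc; fin_cases hc <;> decide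

theorem alpha_lower_id :
    ∀ c ∈ konsonanAlphabet, PySem.Chars.lowerChar c = c := by
  intro c hc; fin_cases hc <;> decide

set_option maxRecDepth 2000 in
theorem alpha_upper_nodup : (konsonanAlphabet.map PySem.Chars.upperChar).Nodup := by
  decide

theorem alpha_nodup : konsonanAlphabet.Nodup := by decide

theorem alpha_disjoint :
    ∀ x ∈ konsonanAlphabet, PySem.Chars.upperChar x ∉ konsonanAlphabet := by
  intro c hc; fin_cases hc <;> decide

theorem cons_isupper :
    ∀ x ∈ konsonanCons,
      PySem.Chars.isupper (PySem.Chars.upperChar x) = true := by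
  intro c hc; fin_cases hc <;> decide

-- per-character value of the translation table
theorem lookup_char (f : Char → String) (ch : Char) :
    (konsonanAlphabet.foldl
        (fun t c => (t.insert c (f c)).insert (PySem.Chars.upperChar c) (f c))
        PySem.Dict.empty).getD ch ""
      = if konsonanAlphabet.contains (PySem.Chars.lowerChar ch)
        then f (PySem.Chars.lowerChar ch) else "" := by
  by_cases hu : ch ∈ konsonanAlphabet.map PySem.Chars.upperChar
  · obtain ⟨c0, hc0, rfl⟩ := List.mem_map.mp hu
    rw [getD_build_upper f _ _ _ hc0 alpha_upper_nodup alpha_disjoint]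
    have hlc : PySem.Chars.lowerChar (PySem.Chars.upperChar c0) = c0 :=
      alpha_lower_upper c0 hc0
    rw [hlc, if_pos (by simpa using hc0)]
  · by_cases hl : ch ∈ konsonanAlphabet
    · rw [getD_build_lower f _ _ _ hl alpha_nodup hu]
      have hlc : PySem.Chars.lowerChar ch = ch := alpha_lower_id ch hl
      rw [hlc, if_pos (by simpa using hl)]
    · have hnc : ¬ (konsonanAlphabet.contains (PySem.Chars.lowerChar ch) = true) := by
        intro hcon
        have hm : PySem.Chars.lowerChar ch ∈ konsonanAlphabet := by simpa using hcon
        by_cases hup : PySem.Chars.isupper ch = true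
        · exact hu (List.mem_map.mpr ⟨_, hm, upper_lower_roundtrip ch hup⟩)
        · have hid : PySem.Chars.lowerChar ch = ch := by
            simp [PySem.Chars.lowerChar, hup]
          exact hl (hid ▸ hm)
      rw [getD_build_skip f _ _ _ hl hu, if_neg hnc]
      simp [PySem.Dict.getD_empty]

-- [a] is a substring of l iff a occurs in l
theorem singleton_infix (a : Char) (l : List Char) : [a] <:+: l ↔ a ∈ l := by
  constructor
  · intro h; exact (List.IsInfix.sublist h).subset (List.mem_singleton_self a)
  · intro h
    obtain ⟨s, t, rfl⟩ := List.append_of_mem h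
    exact ⟨s, t, by simp⟩

-- single-character 'in': membership
theorem isIn_singleton (u : Char) (l : List Char) :
    PySem.Chars.isIn [u] l = l.contains u := by
  by_cases h : u ∈ l <;>
    simp [PySem.Chars.isIn, bne, PySem.Chars.find_eq_neg_one_iff, singleton_infix, h]

-- intercalating with the empty separator is flattening
theorem intercalate_nil_eq_flatten : ∀ (xss : List (List Char)),
    List.intercalate ([] : List Char) xss = xss.flatten
  | [] => rfl
  | [x] => by simp [List.intercalate]
  | x :: y :: t => by
    have ih := intercalate_nil_eq_flatten (y :: t)
    simp only [List.intercalate] at ih ⊢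
    rw [show List.intersperse ([] : List Char) (x :: y :: t)
        = x :: [] :: List.intersperse [] (y :: t) from rfl]
    simp only [List.flatten_cons] at ih ⊢
    simp [ih]

-- B's per-character output form
def qBfun (param : String) (c : Char) : Char :=
  if PySem.Str.isIn (String.ofList [PySem.Chars.upperChar c]) param
  then PySem.Chars.upperChar c else c

-- the fused per-char lookup pass equals filter-then-map
theorem bside_flatten (param : String) : ∀ (l : List Char),
    (l.map (fun ch =>
        if konsonanAlphabet.contains (PySem.Chars.lowerChar ch)
        then [qBfun param (PySem.Chars.lowerChar ch)] else [])).flatten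
      = ((l.map PySem.Chars.lowerChar).filter
          (fun c => konsonanAlphabet.contains c)).map (qBfun param) := by
  intro l
  induction l with
  | nil => rfl
  | cons c cs ih =>
    simp only [List.map_cons, List.filter_cons, List.flatten_cons]
    by_cases h : konsonanAlphabet.contains (PySem.Chars.lowerChar c) = true
    · simp only [h, if_true, List.map_cons]
      rw [ih]; rfl
    · simp only [h, if_false, Bool.false_eq_true, List.nil_append]
      exact ih

theorem contains_filter_of_pred (f : Char → Bool) (u : Char) (hf : f u = true)
    (l : List Char) : (l.filter f).contains u = l.contains u := by
  by_cases h : u ∈ l <;> simp [List.mem_filter, hf, h]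

-- ===== VERDICT (by name: the statement is the Claim_ definition above) =====
theorem konsonan_spec : Claim_equal_konsonan := by
  intro param _
  unfold Spec_konsonan konsonan konsonan_alt
  simp only
  rw [foldPair_eq, foldFilter_eq]
  simp only [List.nil_append]
  rw [← String.toList_inj, PySem.Str.toList_join, String.toList_ofList]
  have hfun : ∀ ch : Char,
      (String.toList
        ((konsonanAlphabet.foldl
          (fun (t : PySem.Dict Char String) c =>
            (t.insert c
                (if PySem.Str.isIn (String.ofList [PySem.Chars.upperChar c]) param
                 then String.ofList [PySem.Chars.upperChar c] else String.ofList [c])).insert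
              (PySem.Chars.upperChar c)
              (if PySem.Str.isIn (String.ofList [PySem.Chars.upperChar c]) param
               then String.ofList [PySem.Chars.upperChar c] else String.ofList [c]))
          PySem.Dict.empty).getD ch ""))
      = if konsonanAlphabet.contains (PySem.Chars.lowerChar ch)
        then [qBfun param (PySem.Chars.lowerChar ch)] else [] := by
    intro ch
    rw [lookup_char]
    by_cases hc : konsonanAlphabet.contains (PySem.Chars.lowerChar ch) = true
    · rw [if_pos hc, if_pos hc]
      unfold qBfun
      rw [apply_ite String.toList, String.toList_ofList, String.toList_ofList,
        ← apply_ite (fun x => [x])]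
    · rw [if_neg hc, if_neg hc]; simp
  simp only [List.map_map, Function.comp_def, hfun]
  simp only [PySem.Chars.join]
  have hempty : ("" : String).toList = [] := by simp
  rw [hempty, intercalate_nil_eq_flatten, bside_flatten param param.toList]
  have hAB : konsonanAlphabet = konsonanCons := rfl
  rw [hAB]
  apply List.map_congr_left
  intro c hc
  have hmemf := List.mem_filter.mp hc
  have hmem : c ∈ konsonanCons := by simpa using hmemf.2
  have hupp : PySem.Chars.isupper (PySem.Chars.upperChar c) = true :=
    cons_isupper c hmem
  unfold qBfun
  rw [PySem.Str.isIn_eq, String.toList_ofList, isIn_singleton]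
  simp only [contains_filter_of_pred PySem.Chars.isupper (PySem.Chars.upperChar c) hupp]
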